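-- pv_equiv track=rewrite | github.com/Yadkee/ProjectEuler | problems[026-050]/problem027.py | sixn
-- ===== SOURCE A (Python) =====
-- from itertools import count
--
-- def sixn(m):
--     """All primes are of the form 6n + 1 or 6n - 1"""
--     for i in count(1):
--         x = 6 * i + 1
--         if x - 2 < m:
--             yield x - 2
--         else:
--             break
--         if x < m:
--             yield x
--         else:
--             break
-- ===== SOURCE B (Python) =====
-- def sixn(m):
--     for k in range(5, m):
--         r = k % 6
--         if r == 1 or r == 5:
--             yield k
-- ===== Notes on version B (the rewrite author's own statement) =====
-- stated objective: alternative
-- what changed: A generates the 6n+-1 progression arithmetically (computes x=6*i+1 per step and yields x-2 and x with two break points); B instead enumerates every integer in range(5, m) and keeps those whose residue mod 6 is 1 or 5 - a membership-test filter over a plain range rather than stream generation.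
import Mathlib
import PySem

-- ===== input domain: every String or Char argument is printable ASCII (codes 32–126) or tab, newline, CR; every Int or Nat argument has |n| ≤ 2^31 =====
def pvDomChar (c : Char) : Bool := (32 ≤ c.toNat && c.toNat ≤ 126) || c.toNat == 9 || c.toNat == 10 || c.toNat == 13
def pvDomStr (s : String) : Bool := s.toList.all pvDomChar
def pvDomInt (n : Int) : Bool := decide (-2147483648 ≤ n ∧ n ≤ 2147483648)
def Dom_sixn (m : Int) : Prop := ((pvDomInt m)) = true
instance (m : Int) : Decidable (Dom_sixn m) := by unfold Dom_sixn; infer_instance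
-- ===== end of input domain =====

-- B replaces A's arithmetic generation of the 6n±1 stream by a residue-mod-6 filter over range(5, m): alternative decomposition, same values.

-- ===== PORT A =====
-- for i in count(1): x = 6*i+1; yield x-2 if x-2 < m else break; yield x if x < m else break
def sixnLoopA (m i : Int) : List Int :=
  let x := 6 * i + 1
  if h1 : x - 2 < m then
    (x - 2) :: (if h2 : x < m then x :: sixnLoopA m (i + 1) else [])
  else []
termination_by (m - 6 * i).toNat
decreasing_by omega

def sixn (m : Int) : List Int := sixnLoopA m 1

-- ===== PORT B =====
-- for k in range(5, m): r = k % 6; if r == 1 or r == 5: yield k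
def sixnPred (k : Int) : Bool :=
  let r := PySem.Int.mod k 6
  r == 1 || r == 5

def sixn_alt (m : Int) : List Int :=
  (PySem.List.pyRange 5 m 1).filter sixnPred

-- ===== PRECONDITION & SPEC =====
def Spec_sixn (m : Int) (out : List Int) : Prop := out = sixn_alt m
instance (m : Int) (out : List Int) : Decidable (Spec_sixn m out) := by unfold Spec_sixn; infer_instance

-- ===== CLAIM (what is proved, stated in full; the proofs are below) =====
def Claim_equal_sixn : Prop := ∀ (m : Int), Dom_sixn m → Spec_sixn m (sixn m)

-- ===== LEMMAS AND PROOFS =====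

theorem sixnPred_mod (k : Int) : sixnPred k = (k % 6 == 1 || k % 6 == 5) := by
  simp only [sixnPred]
  rw [PySem.Int.mod_eq_emod_of_pos (by norm_num : (0:Int) < 6)]

theorem filter_skip (m a : Int) (h : sixnPred a = false) :
    (PySem.List.pyRange a m 1).filter sixnPred
      = (PySem.List.pyRange (a + 1) m 1).filter sixnPred := by
  by_cases hlt : a < m
  · rw [PySem.List.pyRange_one_cons hlt]
    simp [List.filter, h]
  · rw [PySem.List.pyRange_one_eq_nil (by omega), PySem.List.pyRange_one_eq_nil (by omega)]

theorem filter_take (m a : Int) (h : sixnPred a = true) (hlt : a < m) :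
    (PySem.List.pyRange a m 1).filter sixnPred
      = a :: (PySem.List.pyRange (a + 1) m 1).filter sixnPred := by
  rw [PySem.List.pyRange_one_cons hlt]
  simp [List.filter, h]

theorem sixn_key (m i : Int) :
    sixnLoopA m i = (PySem.List.pyRange (6 * i - 1) m 1).filter sixnPred := by
  induction i using sixnLoopA.induct (m := m) with
  | case2 i x hne =>
    have hne' : ¬(6 * i + 1 - 2 < m) := hne
    rw [sixnLoopA, PySem.List.pyRange_one_eq_nil (by omega)]
    simp only [List.filter_nil]
    exact dif_neg hne'
  | case1 i x h1 h2 =>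
    rw [sixnLoopA]
    simp only at h1 h2
    have hp1 : sixnPred (6 * i - 1) = true := by rw [sixnPred_mod]; simp only [beq_iff_eq, Bool.or_eq_true]; omega
    have hp2 : sixnPred (6 * i) = false := by rw [sixnPred_mod]; simp only [Bool.or_eq_false_iff, beq_eq_false_iff_ne, ne_eq]; omega
    have hp3 : sixnPred (6 * i + 1) = true := by rw [sixnPred_mod]; simp only [beq_iff_eq, Bool.or_eq_true]; omega
    have hp4 : sixnPred (6 * i + 1 + 1) = false := by rw [sixnPred_mod]; simp only [Bool.or_eq_false_iff, beq_eq_false_iff_ne, ne_eq]; omega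
    have hp5 : sixnPred (6 * i + 1 + 1 + 1) = false := by rw [sixnPred_mod]; simp only [Bool.or_eq_false_iff, beq_eq_false_iff_ne, ne_eq]; omega
    have hp6 : sixnPred (6 * i + 1 + 1 + 1 + 1) = false := by rw [sixnPred_mod]; simp only [Bool.or_eq_false_iff, beq_eq_false_iff_ne, ne_eq]; omega
    have hlt1 : 6 * i - 1 < m := by omega
    rw [filter_take m _ hp1 hlt1, show (6:Int) * i - 1 + 1 = 6 * i by ring,
        filter_skip m _ hp2]
    by_cases hx : 6 * i + 1 < m
    · have ih := h2 hx
      rw [dif_pos h1, dif_pos hx,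
          filter_take m _ hp3 hx,
          filter_skip m _ hp4, filter_skip m _ hp5, filter_skip m _ hp6]
      have e : PySem.List.pyRange (6 * i + 1 + 1 + 1 + 1 + 1) m 1
             = PySem.List.pyRange (6 * (i + 1) - 1) m 1 :=
        congrArg (fun a => PySem.List.pyRange a m 1)
          (show (6 : Int) * i + 1 + 1 + 1 + 1 + 1 = 6 * (i + 1) - 1 by ring)
      rw [e, ← ih]
      simp [show (6:Int) * i + 1 - 2 = 6 * i - 1 by ring]
    · rw [dif_pos h1, dif_neg hx,
          PySem.List.pyRange_one_eq_nil (by omega : m ≤ 6 * i + 1)]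
      simp [show (6:Int) * i + 1 - 2 = 6 * i - 1 by ring]

-- ===== VERDICT (by name: the statement is the Claim_ definition above) =====
theorem sixn_spec : Claim_equal_sixn := by
  intro m _
  unfold Spec_sixn sixn sixn_alt
  rw [sixn_key m 1]
  norm_num
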